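-- pv_equiv track=rewrite | github.com/dimagi/ocs-deploy | ocs_deploy/waf_utils.py | compact_waf_regexes
-- ===== SOURCE A (Python) =====
-- from collections import defaultdict
-- from typing import List, Tuple
--
-- COMPACTIBLE_AFFIXES = (
--     (r"^/a/([-a-zA-Z0-9_]+)/", "$"),
--     (r"^/channels/", "$"),
--     (r"^/", "$"),
-- )
--
-- def compact_waf_regexes_simply(patterns: List[str], max_length: int = 200) -> List[str]:
--     """
--     Compact multiple patterns into combined regexes using OR (|) operator,
--     respecting max_length constraint.
--     """
--     compacted_regexes = []
--     regex_buffer = ""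
--     for pattern in patterns:
--         if len(regex_buffer) + len(pattern) + 1 <= max_length:
--             if regex_buffer:
--                 regex_buffer += "|" + pattern
--             else:
--                 regex_buffer = pattern
--         else:
--             compacted_regexes.append(regex_buffer)
--             regex_buffer = pattern
--     if regex_buffer:
--         compacted_regexes.append(regex_buffer)
--     return compacted_regexes
--
-- def compact_waf_regexes(
--     patterns: List[str],
--     compactible_affixes: Tuple[Tuple[str, str], ...] = COMPACTIBLE_AFFIXES,
--     max_length: int = 200,
-- ) -> List[str]:
--     """
--     Compact regexes into as few as possible regexes each of which is no longer
--     than `max_length` characters. Groups patterns by common prefixes/suffixes.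
--     """
--     patterns_grouped_by_affix = defaultdict(list)
--     non_matching_patterns = []
--
--     # Group patterns by matching prefix/suffix pairs
--     for pattern in patterns:
--         for prefix, suffix in compactible_affixes:
--             if (
--                 pattern.startswith(prefix)
--                 and pattern.endswith(suffix)
--                 and len(pattern) >= len(prefix + suffix)
--             ):
--                 patterns_grouped_by_affix[(prefix, suffix)].append(
--                     pattern[len(prefix) : -len(suffix)]
--                 )
--                 break
--         else:
--             non_matching_patterns.append(pattern)
--
--     # Create intermediate compacted regexes
--     intermediate_compacted_regexes = [
--         f"{prefix}({regex}){suffix}"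
--         for (prefix, suffix), grouped_patterns in patterns_grouped_by_affix.items()
--         for regex in compact_waf_regexes_simply(
--             grouped_patterns, max_length=max_length - len(prefix + suffix) - 2
--         )
--     ] + compact_waf_regexes_simply(non_matching_patterns, max_length=max_length)
--
--     # Sort and further compact
--     intermediate_compacted_regexes.sort(key=lambda r: len(r))
--     final_compacted_regexes = []
--
--     while intermediate_compacted_regexes:
--         shortest = intermediate_compacted_regexes[0]
--         longest = intermediate_compacted_regexes[-1]
--         if (
--             len(shortest) + len(longest) + 1 > max_length
--             or len(intermediate_compacted_regexes) == 1
--         ):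
--             final_compacted_regexes.append(intermediate_compacted_regexes.pop())
--         else:
--             intermediate_compacted_regexes.pop(0)
--             intermediate_compacted_regexes[-1] = f"{shortest}|{longest}"
--
--     return final_compacted_regexes
-- ===== SOURCE B (Python) =====
-- from collections import deque
--
-- COMPACTIBLE_AFFIXES = (
--     (r"^/a/([-a-zA-Z0-9_]+)/", "$"),
--     (r"^/channels/", "$"),
--     (r"^/", "$"),
-- )
--
-- def _chunk(patterns, max_length):
--     # chunks kept in reverse order, current chunk first
--     rev = deque([""])
--     for p in patterns:
--         buf = rev[0]
--         if len(buf) + len(p) + 1 <= max_length: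
--             rev[0] = buf + "|" + p if buf else p
--         else:
--             rev.appendleft(p)
--     out = list(rev) if rev[0] else list(rev)[1:]
--     out.reverse()
--     return out
--
-- def _merge(regexes, max_length):
--     # regexes sorted ascending by length; pair shortest pieces onto the
--     # current longest with two indices instead of popping from the list
--     out = []
--     if not regexes:
--         return out
--     lo, hi = 0, len(regexes) - 1
--     current = regexes[hi]
--     while lo < hi:
--         if len(regexes[lo]) + len(current) + 1 <= max_length:
--             current = regexes[lo] + "|" + current
--             lo += 1
--         else:
--             out.append(current)
--             hi -= 1
--             current = regexes[hi]
--     out.append(current)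
--     return out
--
-- def compact_waf_regexes(patterns, compactible_affixes=COMPACTIBLE_AFFIXES, max_length=200):
--     groups = {}
--     rest = []
--     for p in patterns:
--         affix = next(
--             ((pre, suf) for pre, suf in compactible_affixes
--              if p.startswith(pre) and p.endswith(suf) and len(p) >= len(pre) + len(suf)),
--             None,
--         )
--         if affix is None:
--             rest.append(p)
--         else:
--             pre, suf = affix
--             groups.setdefault(affix, []).append(p[len(pre):-len(suf)])
--     intermediate = []
--     for (pre, suf), grp in groups.items():
--         for chunk in _chunk(grp, max_length - len(pre) - len(suf) - 2):
--             intermediate.append(f"{pre}({chunk}){suf}")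
--     intermediate.extend(_chunk(rest, max_length))
--     intermediate.sort(key=len)
--     return _merge(intermediate, max_length)
-- ===== Notes on version B (the rewrite author's own statement) =====
-- stated objective: alternative
-- what changed: The final merge no longer mutates the sorted list with pop(0)/pop()/last-slot assignment: B walks it with two indices and a 'current' accumulator; the chunking helper builds its chunk list back-to-front (current chunk at the head) instead of keeping a separate buffer, and the affix search is a next(...) generator expression instead of a for/break/else loop.
import Mathlib
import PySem

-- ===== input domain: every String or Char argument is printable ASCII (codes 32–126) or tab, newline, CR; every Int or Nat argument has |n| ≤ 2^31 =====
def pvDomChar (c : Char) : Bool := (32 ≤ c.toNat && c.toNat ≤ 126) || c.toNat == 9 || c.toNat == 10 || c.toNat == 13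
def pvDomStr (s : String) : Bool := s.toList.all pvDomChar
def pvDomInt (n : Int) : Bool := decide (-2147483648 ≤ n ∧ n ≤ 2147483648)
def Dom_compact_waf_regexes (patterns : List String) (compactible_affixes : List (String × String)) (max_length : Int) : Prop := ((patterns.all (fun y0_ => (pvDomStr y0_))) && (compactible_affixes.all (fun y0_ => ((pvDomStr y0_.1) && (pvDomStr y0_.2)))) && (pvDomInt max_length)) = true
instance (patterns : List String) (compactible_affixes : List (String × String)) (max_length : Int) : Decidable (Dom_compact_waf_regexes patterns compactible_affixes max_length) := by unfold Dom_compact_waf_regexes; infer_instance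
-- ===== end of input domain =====

-- B rewrites A's destructive final merge (pop(0)/pop()/last-slot mutation on the sorted list)
-- as a non-mutating two-index walk with an accumulator, builds the chunk list of
-- compact_waf_regexes_simply back-to-front, and finds the matching affix with next()/find?;
-- objective: alternative (same asymptotic cost, no list mutation).

-- ===== PORT A =====
-- compact_waf_regexes_simply: loop state = (compacted_regexes, regex_buffer)
def pvSimplyStep (max_length : Int) (st : List String × String) (pattern : String) : List String × String :=
  if PySem.Str.len st.2 + PySem.Str.len pattern + 1 ≤ max_length then
    if st.2 ≠ "" then (st.1, st.2 ++ "|" ++ pattern) else (st.1, pattern)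
  else (st.1 ++ [st.2], pattern)

def compact_waf_regexes_simply (patterns : List String) (max_length : Int) : List String :=
  let st := patterns.foldl (pvSimplyStep max_length) ([], "")
  if st.2 ≠ "" then st.1 ++ [st.2] else st.1

-- the inner `for prefix, suffix in compactible_affixes: … break / else:` loop
def pvFindAffixA (pattern : String) : List (String × String) → Option (String × String)
  | [] => none
  | (pre, suf) :: rest =>
    if PySem.Str.startswith pattern pre && PySem.Str.endswith pattern suf
        && decide (PySem.Str.len pattern ≥ PySem.Str.len (pre ++ suf)) then
      some (pre, suf)
    else pvFindAffixA pattern rest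

-- pattern[len(prefix) : -len(suffix)]
def pvStripA (pattern pre suf : String) : String :=
  String.ofList (PySem.List.slice pattern.toList (some (PySem.Str.len pre)) (some (-(PySem.Str.len suf))))

-- body of the grouping loop: state = (patterns_grouped_by_affix, non_matching_patterns)
def pvGroupStepA (compactible_affixes : List (String × String))
    (st : PySem.Dict (String × String) (List String) × List String) (pattern : String) :
    PySem.Dict (String × String) (List String) × List String :=
  match pvFindAffixA pattern compactible_affixes with
  | some (pre, suf) => (st.1.modify (pre, suf) [] (· ++ [pvStripA pattern pre suf]), st.2)
  | none => (st.1, st.2 ++ [pattern])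

-- the `while intermediate_compacted_regexes:` loop with its two pops and last-slot update
def pvMergeA (max_length : Int) : List String → List String
  | [] => []
  | x :: xs =>
    let longest := (x :: xs).getLast (by simp)
    if h : PySem.Str.len x + PySem.Str.len longest + 1 > max_length ∨ (x :: xs).length = 1 then
      longest :: pvMergeA max_length ((x :: xs).dropLast)
    else
      pvMergeA max_length (xs.dropLast ++ [x ++ "|" ++ longest])
termination_by l => l.length
decreasing_by
  · simp
  · have hxs : xs ≠ [] := by
      intro hn; exact h (Or.inr (by simp [hn]))
    have hlen : 1 ≤ xs.length := List.length_pos_of_ne_nil hxs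
    simp [List.length_dropLast]
    omega

def compact_waf_regexes (patterns : List String) (compactible_affixes : List (String × String)) (max_length : Int) : List String :=
  let grouped := patterns.foldl (pvGroupStepA compactible_affixes) (PySem.Dict.empty, [])
  let intermediate :=
    (grouped.1.items.flatMap (fun kv =>
        (compact_waf_regexes_simply kv.2 (max_length - PySem.Str.len (kv.1.1 ++ kv.1.2) - 2)).map
          (fun regex => kv.1.1 ++ "(" ++ regex ++ ")" ++ kv.1.2)))
      ++ compact_waf_regexes_simply grouped.2 max_length
  let sortedInter := PySem.List.sorted intermediate (fun r => PySem.Str.len r)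
  pvMergeA max_length sortedInter

-- ===== PORT B =====
-- _chunk: chunks kept in reverse order, current chunk at the head
def pvChunkStepB (max_length : Int) (rev : List String) (p : String) : List String :=
  match rev with
  | [] => []  -- unreachable: rev starts nonempty and every step keeps it nonempty
  | buf :: rest =>
    if PySem.Str.len buf + PySem.Str.len p + 1 ≤ max_length then
      (if buf ≠ "" then buf ++ "|" ++ p else p) :: rest
    else p :: buf :: rest

def pvChunkB (patterns : List String) (max_length : Int) : List String :=
  let rev := patterns.foldl (pvChunkStepB max_length) [""]
  let out := match rev with
    | [] => []  -- unreachable, see pvChunkStepB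
    | b :: rest => if b ≠ "" then b :: rest else rest
  out.reverse

-- _merge's while loop; List.getD ports regexes[i] (every index used is in range)
def pvMergeGoB (regexes : List String) (max_length : Int) (lo hi : Nat) (current : String) (out : List String) : List String :=
  if _h : lo < hi then
    if PySem.Str.len (regexes.getD lo "") + PySem.Str.len current + 1 ≤ max_length then
      pvMergeGoB regexes max_length (lo + 1) hi (regexes.getD lo "" ++ "|" ++ current) out
    else
      pvMergeGoB regexes max_length lo (hi - 1) (regexes.getD (hi - 1) "") (out ++ [current])
  else out ++ [current]
termination_by hi - lo
decreasing_by all_goals omega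

def pvMergeB (regexes : List String) (max_length : Int) : List String :=
  if regexes = [] then []
  else pvMergeGoB regexes max_length 0 (regexes.length - 1) (regexes.getD (regexes.length - 1) "") []

-- next((… for pre, suf in compactible_affixes if …), None)  and  setdefault(...).append(...)
def pvGroupStepB (compactible_affixes : List (String × String))
    (st : PySem.Dict (String × String) (List String) × List String) (p : String) :
    PySem.Dict (String × String) (List String) × List String :=
  match compactible_affixes.find? (fun a =>
      PySem.Str.startswith p a.1 && PySem.Str.endswith p a.2
        && decide (PySem.Str.len p ≥ PySem.Str.len a.1 + PySem.Str.len a.2)) with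
  | none => (st.1, st.2 ++ [p])
  | some a =>
      (st.1.modify a []
        (· ++ [String.ofList (PySem.List.slice p.toList (some (PySem.Str.len a.1)) (some (-(PySem.Str.len a.2))))]),
       st.2)

def compact_waf_regexes_alt (patterns : List String) (compactible_affixes : List (String × String)) (max_length : Int) : List String :=
  let grouped := patterns.foldl (pvGroupStepB compactible_affixes) (PySem.Dict.empty, [])
  let intermediate := grouped.1.items.foldl (fun acc kv =>
      (pvChunkB kv.2 (max_length - PySem.Str.len kv.1.1 - PySem.Str.len kv.1.2 - 2)).foldl
        (fun acc chunk => acc ++ [kv.1.1 ++ "(" ++ chunk ++ ")" ++ kv.1.2]) acc) []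
  let intermediate2 := intermediate ++ pvChunkB grouped.2 max_length
  let sortedInter := PySem.List.sorted intermediate2 (fun r => PySem.Str.len r)
  pvMergeB sortedInter max_length

-- ===== PRECONDITION & SPEC =====
def Spec_compact_waf_regexes (patterns : List String) (compactible_affixes : List (String × String)) (max_length : Int) (out : List String) : Prop := out = compact_waf_regexes_alt patterns compactible_affixes max_length
instance (patterns : List String) (compactible_affixes : List (String × String)) (max_length : Int) (out : List String) : Decidable (Spec_compact_waf_regexes patterns compactible_affixes max_length out) := by unfold Spec_compact_waf_regexes; infer_instance

-- ===== CLAIM (what is proved, stated in full; the proofs are below) =====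
def Claim_equal_compact_waf_regexes : Prop := ∀ (patterns : List String) (compactible_affixes : List (String × String)) (max_length : Int), Dom_compact_waf_regexes patterns compactible_affixes max_length → Spec_compact_waf_regexes patterns compactible_affixes max_length (compact_waf_regexes patterns compactible_affixes max_length)

-- ===== LEMMAS AND PROOFS =====

-- A's for/break/else affix search is B's find?
theorem pvFindAffix_eq (l : List (String × String)) (p : String) :
    pvFindAffixA p l = l.find? (fun a =>
      PySem.Str.startswith p a.1 && PySem.Str.endswith p a.2
        && decide (PySem.Str.len p ≥ PySem.Str.len a.1 + PySem.Str.len a.2)) := by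
  induction l with
  | nil => rfl
  | cons a t ih =>
    obtain ⟨pre, suf⟩ := a
    simp only [pvFindAffixA, List.find?_cons, PySem.Str.len_append]
    split <;> rename_i hb
    · rw [hb]
    · rw [Bool.not_eq_true] at hb
      rw [hb, ih]

-- the two grouping-loop bodies agree
theorem pvGroupStep_eq (ca : List (String × String))
    (st : PySem.Dict (String × String) (List String) × List String) (p : String) :
    pvGroupStepA ca st p = pvGroupStepB ca st p := by
  unfold pvGroupStepA pvGroupStepB pvStripA
  rw [pvFindAffix_eq]
  cases (ca.find? _) with
  | none => rfl
  | some a => rfl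

-- B's reverse-order chunk accumulator tracks A's (compacted, buffer) state
theorem pvChunk_inv (maxL : Int) (patterns : List String) :
    ∀ (out : List String) (buf : String),
      patterns.foldl (pvChunkStepB maxL) (buf :: out.reverse) =
        (patterns.foldl (pvSimplyStep maxL) (out, buf)).2 ::
          (patterns.foldl (pvSimplyStep maxL) (out, buf)).1.reverse := by
  induction patterns with
  | nil => intro out buf; rfl
  | cons p t ih =>
    intro out buf
    rw [List.foldl_cons, List.foldl_cons]
    by_cases hle : PySem.Str.len buf + PySem.Str.len p + 1 ≤ maxL
    · have hc : pvChunkStepB maxL (buf :: out.reverse) p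
          = (if buf ≠ "" then buf ++ "|" ++ p else p) :: out.reverse := by
        simp only [pvChunkStepB]
        rw [if_pos hle]
      have hs : pvSimplyStep maxL (out, buf) p
          = (out, if buf ≠ "" then buf ++ "|" ++ p else p) := by
        simp only [pvSimplyStep]
        rw [if_pos hle]
        by_cases hne : buf ≠ "" <;> simp [hne]
      rw [hc, hs]
      exact ih out _
    · have hc : pvChunkStepB maxL (buf :: out.reverse) p = p :: (out ++ [buf]).reverse := by
        simp only [pvChunkStepB]
        rw [if_neg hle]
        simp
      have hs : pvSimplyStep maxL (out, buf) p = (out ++ [buf], p) := by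
        simp only [pvSimplyStep]
        rw [if_neg hle]
      rw [hc, hs]
      exact ih (out ++ [buf]) p

theorem pvChunk_eq (patterns : List String) (maxL : Int) :
    compact_waf_regexes_simply patterns maxL = pvChunkB patterns maxL := by
  unfold compact_waf_regexes_simply pvChunkB
  have h0 : ("" : String) :: ([] : List String).reverse = [""] := rfl
  rw [← h0, pvChunk_inv maxL patterns [] ""]
  by_cases hne : (patterns.foldl (pvSimplyStep maxL) ([], "")).2 ≠ "" <;>
    simp [hne]

-- evaluation lemmas for A's merge loop
theorem pvMergeA_singleton (maxL : Int) (c : String) : pvMergeA maxL [c] = [c] := by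
  simp [pvMergeA]

theorem pvMergeA_concat₂ (maxL : Int) (x c : String) (l : List String) :
    pvMergeA maxL (x :: (l ++ [c])) =
      if maxL < PySem.Str.len x + PySem.Str.len c + 1 then c :: pvMergeA maxL (x :: l)
      else pvMergeA maxL (l ++ [x ++ "|" ++ c]) := by
  rw [pvMergeA]
  have hgl : (x :: (l ++ [c])).getLast (by simp) = c := by
    rw [List.getLast_cons (by simp), List.getLast_concat]
  have hdl : (x :: (l ++ [c])).dropLast = x :: l := by
    rw [show x :: (l ++ [c]) = (x :: l) ++ [c] by simp, List.dropLast_concat]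
  have hlen : (x :: (l ++ [c])).length ≠ 1 := by simp
  simp only [hgl, hdl, List.dropLast_concat]
  by_cases hgt : PySem.Str.len x + PySem.Str.len c + 1 > maxL
  · rw [dif_pos (Or.inl hgt), if_pos (by omega)]
  · rw [dif_neg (not_or.mpr ⟨by omega, hlen⟩), if_neg (by omega)]

-- B's index walk over the sorted list computes A's pop-based merge of the
-- remaining segment rs[lo:hi] ++ [current]
theorem pvMerge_inv (rs : List String) (maxL : Int) :
    ∀ (k lo hi : Nat) (current : String) (out : List String),
      k = hi - lo → lo ≤ hi → hi < rs.length →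
      pvMergeGoB rs maxL lo hi current out =
        out ++ pvMergeA maxL ((rs.drop lo).take (hi - lo) ++ [current]) := by
  intro k
  induction k using Nat.strong_induction_on with
  | _ k ih =>
    intro lo hi current out hk hle hlt
    rw [pvMergeGoB]
    by_cases hlohi : lo < hi
    · have hlo : lo < rs.length := lt_trans hlohi hlt
      have hgd : rs.getD lo "" = rs[lo] := List.getD_eq_getElem rs "" hlo
      have hseg : (rs.drop lo).take (hi - lo) = rs[lo] :: (rs.drop (lo + 1)).take (hi - (lo + 1)) := by
        rw [show hi - lo = (hi - (lo + 1)) + 1 by omega]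
        rw [← List.getElem_cons_drop (h := hlo), List.take_succ_cons]
      by_cases hc : PySem.Str.len (rs.getD lo "") + PySem.Str.len current + 1 ≤ maxL
      · rw [dif_pos hlohi, if_pos hc]
        rw [ih (hi - (lo + 1)) (by omega) (lo + 1) hi _ out rfl (by omega) hlt]
        rw [hseg, hgd] at *
        rw [show rs[lo] :: (rs.drop (lo + 1)).take (hi - (lo + 1)) ++ [current]
              = rs[lo] :: ((rs.drop (lo + 1)).take (hi - (lo + 1)) ++ [current]) by simp]
        rw [pvMergeA_concat₂, if_neg (by omega)]
      · rw [dif_pos hlohi, if_neg hc]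
        rw [ih (hi - 1 - lo) (by omega) lo (hi - 1) _ (out ++ [current]) rfl (by omega) (by omega)]
        have hhi1 : hi - 1 < rs.length := by omega
        have hgdh : rs.getD (hi - 1) "" = rs[hi - 1] := List.getD_eq_getElem rs "" hhi1
        have hsegr : (rs.drop lo).take (hi - lo) = (rs.drop lo).take (hi - 1 - lo) ++ [rs[hi - 1]] := by
          rw [show hi - lo = (hi - 1 - lo) + 1 by omega, List.take_add_one, List.getElem?_drop,
            show lo + (hi - 1 - lo) = hi - 1 by omega, List.getElem?_eq_getElem hhi1]
          rfl
        rw [hgd] at hc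
        rw [hgdh, hseg,
          show rs[lo] :: (rs.drop (lo + 1)).take (hi - (lo + 1)) ++ [current]
              = rs[lo] :: ((rs.drop (lo + 1)).take (hi - (lo + 1)) ++ [current]) by simp]
        rw [pvMergeA_concat₂, if_pos (by omega)]
        rw [show rs[lo] :: (rs.drop (lo + 1)).take (hi - (lo + 1)) = (rs.drop lo).take (hi - lo) from hseg.symm]
        rw [hsegr]
        simp
    · have hlh : lo = hi := by omega
      rw [dif_neg hlohi]
      rw [show (rs.drop lo).take (hi - lo) = [] by simp [hlh]]
      rw [List.nil_append, pvMergeA_singleton]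

theorem pvMerge_eq (rs : List String) (maxL : Int) :
    pvMergeA maxL rs = pvMergeB rs maxL := by
  unfold pvMergeB
  by_cases hnil : rs = []
  · simp [hnil, pvMergeA]
  · rw [if_neg hnil]
    have hlen : 1 ≤ rs.length := List.length_pos_of_ne_nil hnil
    rw [pvMerge_inv rs maxL (rs.length - 1) 0 (rs.length - 1) _ [] rfl (by omega) (by omega)]
    have hgd : rs.getD (rs.length - 1) "" = rs.getLast hnil := by
      rw [List.getD_eq_getElem rs "" (by omega), List.getLast_eq_getElem]
    rw [hgd]
    rw [show (rs.drop 0).take (rs.length - 1 - 0) ++ [rs.getLast hnil] = rs by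
      simp only [List.drop_zero, Nat.sub_zero]
      rw [← List.dropLast_eq_take, List.dropLast_concat_getLast]]
    simp

-- ===== VERDICT (by name: the statement is the Claim_ definition above) =====
theorem compact_waf_regexes_spec : Claim_equal_compact_waf_regexes := by
  intro patterns ca maxL _
  show _ = _
  dsimp only [compact_waf_regexes, compact_waf_regexes_alt]
  rw [show pvGroupStepA ca = pvGroupStepB ca from funext fun st => funext fun p => pvGroupStep_eq ca st p]
  rw [show (fun (acc : List String) (kv : (String × String) × List String) =>
        (pvChunkB kv.2 (maxL - PySem.Str.len kv.1.1 - PySem.Str.len kv.1.2 - 2)).foldl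
          (fun acc chunk => acc ++ [kv.1.1 ++ "(" ++ chunk ++ ")" ++ kv.1.2]) acc)
      = (fun (acc : List String) (kv : (String × String) × List String) => acc ++
        (pvChunkB kv.2 (maxL - PySem.Str.len kv.1.1 - PySem.Str.len kv.1.2 - 2)).map
          (fun chunk => kv.1.1 ++ "(" ++ chunk ++ ")" ++ kv.1.2)) from
    funext fun acc => funext fun kv => PySem.List.foldl_append_singleton_eq_map _ _ acc]
  rw [PySem.List.foldl_append_eq_flatMap, List.nil_append]
  rw [show (fun (kv : (String × String) × List String) =>
        (pvChunkB kv.2 (maxL - PySem.Str.len kv.1.1 - PySem.Str.len kv.1.2 - 2)).map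
          (fun chunk => kv.1.1 ++ "(" ++ chunk ++ ")" ++ kv.1.2))
      = (fun (kv : (String × String) × List String) =>
        (compact_waf_regexes_simply kv.2 (maxL - PySem.Str.len (kv.1.1 ++ kv.1.2) - 2)).map
          (fun regex => kv.1.1 ++ "(" ++ regex ++ ")" ++ kv.1.2)) from
    funext fun kv => by
      rw [pvChunk_eq, PySem.Str.len_append,
        show maxL - (PySem.Str.len kv.1.1 + PySem.Str.len kv.1.2) - 2
          = maxL - PySem.Str.len kv.1.1 - PySem.Str.len kv.1.2 - 2 by ring]]
  rw [← pvChunk_eq, ← pvMerge_eq]
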